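-- pv_equiv track=rewrite | github.com/anryko/aws-ansible | lambdas/asg-tools/src/aws.py | _resource_tags_to_dict
-- ===== SOURCE A (Python) =====
-- from typing import (
--     Any,
--     Callable,
--     Dict,
--     Iterator,
--     List,
--     NamedTuple,
--     Optional,
--     Tuple,
--     Union,
-- )
--
-- def _resource_tags_to_dict(
--         tags: List[Dict[str, str]]) -> Dict[str, Dict[str, str]]:
--     resource_tags: Dict[str, Dict[str, str]] = {}
--     for tag in tags:
--         if tag['ResourceId'] not in resource_tags:
--             resource_tags[tag['ResourceId']] = {}
--
--         resource_tags[tag['ResourceId']][tag['Key']] = tag.get('Value', '')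
--
--     return resource_tags
-- ===== SOURCE B (Python) =====
-- def _resource_tags_to_dict(tags):
--     rids = list(dict.fromkeys(t['ResourceId'] for t in tags))
--     return {
--         rid: {t['Key']: t.get('Value', '') for t in tags if t['ResourceId'] == rid}
--         for rid in rids
--     }
-- ===== Notes on version B (the rewrite author's own statement) =====
-- stated objective: alternative
-- what changed: Replaces A's single mutating scan over a nested dict with a two-phase grouping: first collect the distinct ResourceIds in first-occurrence order (dict.fromkeys), then build each inner dict by a comprehension filtering the tags for that ResourceId.
import Mathlib
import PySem

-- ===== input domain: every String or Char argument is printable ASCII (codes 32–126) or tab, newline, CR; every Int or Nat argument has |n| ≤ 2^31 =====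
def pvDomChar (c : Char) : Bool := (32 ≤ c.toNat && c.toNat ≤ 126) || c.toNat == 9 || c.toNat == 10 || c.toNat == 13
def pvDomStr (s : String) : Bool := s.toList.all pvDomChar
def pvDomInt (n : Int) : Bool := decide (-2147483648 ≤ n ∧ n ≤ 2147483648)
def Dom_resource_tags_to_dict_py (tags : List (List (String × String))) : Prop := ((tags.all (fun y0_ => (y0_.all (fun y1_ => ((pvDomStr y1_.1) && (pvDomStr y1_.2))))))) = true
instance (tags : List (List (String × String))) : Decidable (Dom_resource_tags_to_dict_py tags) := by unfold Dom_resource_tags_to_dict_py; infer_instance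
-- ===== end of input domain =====

-- B groups by first collecting the distinct ResourceIds, then building each inner dict by a
-- filtering pass per ResourceId, instead of A's single scan mutating a nested dict (objective: alternative).


-- shared lookups: tag['ResourceId'], tag['Key'], tag.get('Value','') (a tag is a Python dict,
-- modelled as PySem.Dict.ofList of its pair list; under Pre_ the first two keys are present,
-- so getD never takes its default for them)
def pvRid (t : List (String × String)) : String := (PySem.Dict.ofList t).getD "ResourceId" ""
def pvKey (t : List (String × String)) : String := (PySem.Dict.ofList t).getD "Key" ""
def pvVal (t : List (String × String)) : String := (PySem.Dict.ofList t).getD "Value" ""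

-- ===== PORT A =====
-- one loop iteration of A's for-loop (the nested assignment d[rid][key] = val is
-- d.modify rid _ (insert key val), the in-place mutation of the inner dict)
def pvStepA (rt : PySem.Dict String (PySem.Dict String String)) (tag : List (String × String)) :
    PySem.Dict String (PySem.Dict String String) :=
  let rid := pvRid tag
  let rt := if rt.contains rid then rt else rt.insert rid PySem.Dict.empty
  rt.modify rid PySem.Dict.empty (fun inner => inner.insert (pvKey tag) (pvVal tag))

def resource_tags_to_dict_py (tags : List (List (String × String))) : List (String × List (String × String)) :=
  ((tags.foldl pvStepA PySem.Dict.empty).items).map (fun p => (p.1, p.2.items))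

-- ===== PORT B =====
-- the inner dict comprehension {t['Key']: t.get('Value','') for t in ts}
def pvInnerB (ts : List (List (String × String))) : PySem.Dict String String :=
  ts.foldl (fun inner t => inner.insert (pvKey t) (pvVal t)) PySem.Dict.empty

def resource_tags_to_dict_py_alt (tags : List (List (String × String))) : List (String × List (String × String)) :=
  let rids := PySem.Set.ofList (tags.map pvRid)   -- list(dict.fromkeys(...))
  rids.map (fun rid => (rid, (pvInnerB (tags.filter (fun t => pvRid t == rid))).items))

-- ===== PRECONDITION & SPEC =====
-- Pre_ excludes tags missing the 'ResourceId' or 'Key' entry, on which Python A raises KeyError.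
def Pre_resource_tags_to_dict_py (tags : List (List (String × String))) : Prop :=
  (tags.all (fun t => (PySem.Dict.ofList t).contains "ResourceId" && (PySem.Dict.ofList t).contains "Key")) = true
instance (tags : List (List (String × String))) : Decidable (Pre_resource_tags_to_dict_py tags) := by unfold Pre_resource_tags_to_dict_py; infer_instance
def pvWitness_resource_tags_to_dict_py : (List (List (String × String))) :=
  [[("ResourceId", "i-1"), ("Key", "Name"), ("Value", "web")], [("ResourceId", "i-1"), ("Key", "Env")]]

def Spec_resource_tags_to_dict_py (tags : List (List (String × String))) (out : List (String × List (String × String))) : Prop := out = resource_tags_to_dict_py_alt tags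
instance (tags : List (List (String × String))) (out : List (String × List (String × String))) : Decidable (Spec_resource_tags_to_dict_py tags out) := by unfold Spec_resource_tags_to_dict_py; infer_instance

-- ===== CLAIM (what is proved, stated in full; the proofs are below) =====
def Claim_equal_resource_tags_to_dict_py : Prop := ∀ (tags : List (List (String × String))), Dom_resource_tags_to_dict_py tags → Pre_resource_tags_to_dict_py tags → Spec_resource_tags_to_dict_py tags (resource_tags_to_dict_py tags)

-- ===== LEMMAS AND PROOFS =====

-- A's accumulator after processing l, characterised: one entry per distinct ResourceId in
-- first-occurrence order, holding the inner dict built from exactly the tags with that id.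
lemma foldA_items (l : List (List (String × String))) :
    (l.foldl pvStepA PySem.Dict.empty).items
      = (PySem.Set.ofList (l.map pvRid)).map
          (fun r => (r, pvInnerB (l.filter (fun t => pvRid t == r)))) := by
  induction l using List.reverseRecOn with
  | nil => rfl
  | append_singleton l t ih =>
    rw [List.foldl_append, List.foldl_cons, List.foldl_nil]
    rw [List.map_append, PySem.Set.ofList_append]
    set d := l.foldl pvStepA PySem.Dict.empty with hd
    set S := PySem.Set.ofList (l.map pvRid) with hS
    have hnd : S.Nodup := PySem.Set.nodup_ofList _
    have hkeys : d.keys = S := by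
      show d.items.map Prod.fst = S
      have h2 : ∀ r ∈ S, (Prod.fst ∘ fun r => (r, pvInnerB (List.filter (fun t => pvRid t == r) l))) r = id r := fun r _ => rfl
      rw [ih, List.map_map, List.map_congr_left h2, List.map_id]
    have hknd : d.keys.Nodup := hkeys ▸ hnd
    have hcont : d.contains (pvRid t) = decide (pvRid t ∈ S) := by
      rw [PySem.Dict.contains_eq_decide_mem_keys, hkeys]
    have hfilt : ∀ r, (l ++ [t]).filter (fun t' => pvRid t' == r)
        = l.filter (fun t' => pvRid t' == r) ++ (if pvRid t == r then [t] else []) := by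
      intro r; rw [List.filter_append]; congr 1
      cases h : (pvRid t == r) <;> simp [List.filter, h]
    have hset : S.update [pvRid t] = if pvRid t ∈ S then S else S ++ [pvRid t] := by
      rw [PySem.Set.update_cons]
      show (S.add (pvRid t)).update [] = _
      simp [PySem.Set.update, PySem.Set.add]
    by_cases hmem : pvRid t ∈ S
    · -- existing id: modify replaces the one entry
      have hc : d.contains (pvRid t) = true := by rw [hcont]; simpa
      have hmemit : (pvRid t, pvInnerB (l.filter (fun t' => pvRid t' == pvRid t))) ∈ d.items := by
        rw [ih]; exact List.mem_map_of_mem hmem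
      have hgetD : d.getD (pvRid t) PySem.Dict.empty
          = pvInnerB (l.filter (fun t' => pvRid t' == pvRid t)) :=
        PySem.Dict.getD_of_mem_items d hmemit hknd _
      show (pvStepA d t).items = _
      rw [show List.map pvRid [t] = [pvRid t] from rfl, hset, if_pos hmem]
      simp only [pvStepA, PySem.Dict.modify, hc, if_true]
      rw [hgetD, PySem.Dict.items_insert_of_contains d _ hc, ih, List.map_map]
      apply List.map_congr_left
      intro r hr
      by_cases hrr : r = pvRid t
      · subst hrr
        simp only [Function.comp, beq_self_eq_true, if_true, hfilt]
        simp [pvInnerB, List.foldl_append]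
      · have : (r == pvRid t) = false := by simpa using hrr
        simp only [Function.comp, this, hfilt]
        have : (pvRid t == r) = false := by simpa using (fun h => hrr h.symm)
        simp [this]
    · -- new id: insert empty then fill; appends one entry
      have hc : d.contains (pvRid t) = false := by rw [hcont]; simpa
      show (pvStepA d t).items = _
      rw [show List.map pvRid [t] = [pvRid t] from rfl, hset, if_neg hmem]
      simp only [pvStepA, PySem.Dict.modify, hc, Bool.false_eq_true, if_false]
      rw [PySem.Dict.insert_insert_self, PySem.Dict.getD_insert_self,
          PySem.Dict.items_insert_of_not_contains d _ hc, ih, List.map_append]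
      congr 1
      · apply List.map_congr_left
        intro r hr
        have : (pvRid t == r) = false := by
          have : r ≠ pvRid t := fun h => hmem (h ▸ hr)
          simpa using (fun h => this h.symm)
        simp [hfilt, this]
      · have hfl : l.filter (fun t' => pvRid t' == pvRid t) = [] := by
          rw [List.filter_eq_nil_iff]
          intro a ha
          have : pvRid a ∈ S := by rw [hS, PySem.Set.mem_ofList]; exact List.mem_map_of_mem ha
          intro hb
          exact hmem (by rwa [eq_of_beq hb] at this)
        simp [hfilt, hfl, pvInnerB]

-- ===== VERDICT (by name: the statement is the Claim_ definition above) =====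
theorem resource_tags_to_dict_py_spec : Claim_equal_resource_tags_to_dict_py := by
  intro tags _ _
  unfold Spec_resource_tags_to_dict_py resource_tags_to_dict_py resource_tags_to_dict_py_alt
  rw [foldA_items, List.map_map]
  rfl
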